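-- pv_equiv track=rewrite | github.com/dreamsofcode-io/cursed-hello-world | intercal/tools/print.py | figureout
-- ===== SOURCE A (Python) =====
-- def minus(x, y):
--     return (x - y) & 0xFF
--
-- def bitreverse(x):
--     return int("{:08b}".format(x)[::-1], 2)
--
-- def figureout(xs):
--     res = []
--     for i in range(0, len(xs)):
--         val = ord(xs[i])
--         rev = bitreverse(val)
--         prev = 256
--         if i > 0:
--             prev = bitreverse(ord(xs[i - 1]))
--
--         res.append(minus(prev, rev))
--
--     return res
-- ===== SOURCE B (Python) =====
-- def _brev(v):
--     # reverse the 8 bits by three swap stages (halves, pairs, single bits)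
--     v = ((v & 0x0F) << 4) | (v >> 4)
--     v = ((v & 0x33) << 2) | ((v >> 2) & 0x33)
--     return ((v & 0x55) << 1) | ((v >> 1) & 0x55)
--
-- def figureout(xs):
--     r = [_brev(ord(c)) for c in xs]
--     if not r:
--         return []
--     return [-r[0] % 256] + [(a - b) & 0xFF for a, b in zip(r, r[1:])]
-- ===== Notes on version B (the rewrite author's own statement) =====
-- stated objective: faster
-- what changed: Bit reversal is computed by three bit-twiddling swap stages (halves, bit-pairs, single bits) instead of formatting to a binary string, reversing it and reparsing; and the output is produced head-plus-pairwise-zip over the reversal table (first element as -r[0] % 256, rest as differences of adjacent table entries) instead of an indexed loop that branches on i>0 and re-derives the previous char's reversal.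
import Mathlib
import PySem

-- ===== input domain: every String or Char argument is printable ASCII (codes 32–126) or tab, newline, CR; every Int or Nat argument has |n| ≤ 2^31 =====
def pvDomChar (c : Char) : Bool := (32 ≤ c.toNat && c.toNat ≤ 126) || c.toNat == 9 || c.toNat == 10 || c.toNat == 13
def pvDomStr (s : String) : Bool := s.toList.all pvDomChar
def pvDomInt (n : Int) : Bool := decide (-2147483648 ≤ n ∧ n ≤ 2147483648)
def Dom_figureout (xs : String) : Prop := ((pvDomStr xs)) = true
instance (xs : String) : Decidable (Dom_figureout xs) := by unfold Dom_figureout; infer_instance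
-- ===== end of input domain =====

-- B computes the bit reversal by three bitwise swap stages instead of string formatting,
-- and emits the result as head (-r[0] % 256) plus pairwise differences of adjacent table entries,
-- removing A's in-loop branch and recomputation.

-- ===== PORT A =====
-- (x - y) & 0xFF
def pvMinus (x y : Int) : Int := PySem.Int.band (x - y) 255

-- hand port of int("{:08b}".format(x)[::-1], 2): LSB-first fold of the low 8 bits;
-- exact for 0 ≤ x < 256, which holds for ord of every Dom character (codes ≤ 126)
def pvBitreverse (x : Int) : Int :=
  (List.range 8).foldl (fun acc i => acc * 2 + PySem.Int.mod (x >>> i) 2) 0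

def figureout (xs : String) : List Int :=
  let cs := xs.toList
  (PySem.List.pyRange 0 (cs.length : Int) 1).foldl (fun res i =>
    let val : Int := (PySem.List.pyGetD cs i ' ').toNat
    let rev := pvBitreverse val
    let prev : Int := if i > 0 then pvBitreverse ((PySem.List.pyGetD cs (i - 1) ' ').toNat) else 256
    res ++ [pvMinus prev rev]) []

-- ===== PORT B =====
-- three swap stages: halves, bit-pairs, single bits
def pvBrev (v : Int) : Int :=
  let v1 := PySem.Int.bor ((PySem.Int.band v 15) <<< 4) (v >>> 4)
  let v2 := PySem.Int.bor ((PySem.Int.band v1 51) <<< 2) (PySem.Int.band (v1 >>> 2) 51)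
  PySem.Int.bor ((PySem.Int.band v2 85) <<< 1) (PySem.Int.band (v2 >>> 1) 85)

def figureout_alt (xs : String) : List Int :=
  let r := xs.toList.map (fun c => pvBrev (c.toNat : Int))
  match r with
  | [] => []
  | r0 :: rest =>
      PySem.Int.mod (-r0) 256 ::
        (List.zip (r0 :: rest) rest).map (fun ab => PySem.Int.band (ab.1 - ab.2) 255)

-- ===== PRECONDITION & SPEC =====
def Spec_figureout (xs : String) (out : List Int) : Prop := out = figureout_alt xs
instance (xs : String) (out : List Int) : Decidable (Spec_figureout xs out) := by unfold Spec_figureout; infer_instance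

-- ===== CLAIM (what is proved, stated in full; the proofs are below) =====
def Claim_equal_figureout : Prop := ∀ (xs : String), Dom_figureout xs → Spec_figureout xs (figureout xs)

-- ===== LEMMAS AND PROOFS =====
-- the two bit-reversal algorithms agree on every byte value
set_option maxRecDepth 8000 in
theorem brev_eq_bitreverse : ∀ v : Nat, v < 256 → pvBrev (v : Int) = pvBitreverse (v : Int) := by decide

-- head element: A's (256 - rev) & 255 equals B's (-rev) % 256 on every byte value
set_option maxRecDepth 8000 in
theorem head_eq : ∀ v : Nat, v < 256 →
    pvMinus 256 (pvBrev (v : Int)) = PySem.Int.mod (-(pvBrev (v : Int))) 256 := by decide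

-- A's indexed fold, rewritten as a map over the index range, in zip-of-adjacent form
theorem figureout_lists (l : List Char) :
    (PySem.List.pyRange 0 (l.length : Int) 1).map (fun i =>
      pvMinus (if i > 0 then pvBitreverse ((PySem.List.pyGetD l (i - 1) ' ').toNat : Int) else 256)
        (pvBitreverse ((PySem.List.pyGetD l i ' ').toNat : Int)))
    = (List.zip (256 :: l.map (fun c => pvBitreverse ((c.toNat : Int)))) (l.map (fun c => pvBitreverse ((c.toNat : Int))))).map
        (fun pc => pvMinus pc.1 pc.2) := by
  apply List.ext_getElem
  · simp [PySem.List.length_pyRange_one]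
  · intro k h1 h2
    have hk : k < l.length := by
      simpa [PySem.List.length_pyRange_one] using h1
    simp only [List.getElem_map, PySem.List.getElem_pyRange_one, List.getElem_zip, zero_add]
    match k, hk with
    | 0, hk =>
        simp [PySem.List.pyGetD_zero, hk]
    | (k+1), hk =>
        have hs : ((k + 1 : Nat) : Int) - 1 = ((k : Nat) : Int) := by push_cast; ring
        have hk' : k < l.length := by omega
        rw [hs, PySem.List.pyGetD_natCast, PySem.List.pyGetD_natCast]
        simp [hk, hk']

theorem dom_lt (xs : String) (h : Dom_figureout xs) :
    ∀ c ∈ xs.toList, c.toNat < 256 := by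
  intro c hc
  have := List.all_eq_true.mp h c hc
  simp [pvDomChar] at this
  omega

-- the zip-of-adjacent form over A's reversal table equals B's head-plus-pairwise form
theorem lists_eq (l : List Char) (h : ∀ c ∈ l, c.toNat < 256) :
    (List.zip (256 :: l.map (fun c => pvBitreverse ((c.toNat : Int)))) (l.map (fun c => pvBitreverse ((c.toNat : Int))))).map
        (fun pc => pvMinus pc.1 pc.2)
    = (match l.map (fun c => pvBrev ((c.toNat : Int))) with
       | [] => []
       | r0 :: rest =>
           PySem.Int.mod (-r0) 256 ::
             (List.zip (r0 :: rest) rest).map (fun ab => PySem.Int.band (ab.1 - ab.2) 255)) := by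
  have hmap : l.map (fun c => pvBitreverse ((c.toNat : Int)))
      = l.map (fun c => pvBrev ((c.toNat : Int))) := by
    apply List.map_congr_left
    intro d hd
    exact (brev_eq_bitreverse d.toNat (h d hd)).symm
  rw [hmap]
  cases l with
  | nil => simp
  | cons c cs =>
      have hc : c.toNat < 256 := h c (List.mem_cons_self ..)
      simp only [List.map_cons, List.zip_cons_cons]
      exact congrArg₂ _ (head_eq c.toNat hc) (by simp [pvMinus])

-- ===== VERDICT (by name: the statement is the Claim_ definition above) =====
theorem figureout_spec : Claim_equal_figureout := by
  intro xs hdom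
  unfold Spec_figureout figureout figureout_alt
  rw [PySem.List.foldl_append_singleton_eq_map, figureout_lists]
  exact lists_eq xs.toList (dom_lt xs hdom)
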